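-- pv_equiv track=rewrite | github.com/MonterrosaEdair/Portafolio2 | mitad lista.py | mitad
-- ===== SOURCE A (Python) =====
-- def mitad(lista,sublista,res):
--     if lista==[]:
--         return res+[sublista]
--     elif sublista==[]:
--         return res
--     else:
--         if lista[0]>=0:
--             return mitad(lista[1:],sublista+[lista[0]],res)
--         else:
--             return mitad(lista[1:],[],res+[sublista])
-- ===== SOURCE B (Python) =====
-- def mitad(lista, sublista, res):
--     if lista and not sublista:
--         return res
--     k = next((i for i, x in enumerate(lista) if x < 0), len(lista))
--     return res + [sublista + lista[:k]]
-- ===== Notes on version B (the rewrite author's own statement) =====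
-- stated objective: simpler
-- what changed: Replaced the tail recursion that rebuilds sublista/res element by element with a single closed-form scan: find the index of the first negative and return res + [sublista + lista[:k]] (after the same early-return guard).
-- intended difference: When sublista is non-empty and the first (and only reachable) negative of lista is its last element, A returns res + [prefix] + [[]] with a spurious empty group left over from clearing sublista just before lista runs out, while B returns res + [prefix], the intended grouping without the empty artefact. — e.g. on mitad([-1], [1], []): A returns [[1], []], B returns [[1]]
import Mathlib
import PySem

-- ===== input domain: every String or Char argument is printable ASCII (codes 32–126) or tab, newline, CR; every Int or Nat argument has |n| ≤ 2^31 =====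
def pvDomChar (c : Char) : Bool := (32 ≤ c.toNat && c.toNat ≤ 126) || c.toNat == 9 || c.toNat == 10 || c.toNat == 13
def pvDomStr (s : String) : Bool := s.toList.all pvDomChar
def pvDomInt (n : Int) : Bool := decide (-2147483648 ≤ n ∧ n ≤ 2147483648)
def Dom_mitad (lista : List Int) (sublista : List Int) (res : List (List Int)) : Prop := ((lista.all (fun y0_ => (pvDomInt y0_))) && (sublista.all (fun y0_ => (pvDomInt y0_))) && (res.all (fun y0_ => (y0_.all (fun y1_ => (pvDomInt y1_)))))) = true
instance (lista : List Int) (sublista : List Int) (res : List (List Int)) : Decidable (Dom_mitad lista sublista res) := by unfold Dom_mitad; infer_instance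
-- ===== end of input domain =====

-- B replaces A's tail recursion by a closed-form first-negative scan (simpler, one pass);
-- it intentionally omits the spurious trailing [] A emits when lista ends at its first negative (see D_mitad).

-- ===== PORT A =====
def mitad (lista : List Int) (sublista : List Int) (res : List (List Int)) : List (List Int) :=
  match lista with
  | [] => res ++ [sublista]
  | x :: rest =>
    if sublista = [] then res
    else if x ≥ 0 then mitad rest (sublista ++ [x]) res
    else mitad rest [] (res ++ [sublista])

-- ===== PORT B =====
def mitad_alt (lista : List Int) (sublista : List Int) (res : List (List Int)) : List (List Int) :=
  if lista ≠ [] ∧ sublista = [] then res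
  else
    let k := (lista.findIdx? (fun x => decide (x < 0))).getD lista.length
    res ++ [sublista ++ lista.take k]

-- ===== PRECONDITION & SPEC =====
-- When sublista is non-empty and the first negative of lista is its last element, A returns
-- res + [prefix] + [[]] (a leftover empty group from clearing sublista just before lista runs out)
-- while B returns res + [prefix], the intended grouping without the empty artefact.
def D_mitad (lista : List Int) (sublista : List Int) (res : List (List Int)) : Prop :=
  lista ≠ [] ∧ sublista ≠ [] ∧ (∀ x ∈ lista.dropLast, 0 ≤ x) ∧ (∃ y, lista.getLast? = some y ∧ y < 0)
instance (lista : List Int) (sublista : List Int) (res : List (List Int)) : Decidable (D_mitad lista sublista res) := by unfold D_mitad; infer_instance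

def Spec_mitad (lista : List Int) (sublista : List Int) (res : List (List Int)) (out : List (List Int)) : Prop := ¬ D_mitad lista sublista res → out = mitad_alt lista sublista res
instance (lista : List Int) (sublista : List Int) (res : List (List Int)) (out : List (List Int)) : Decidable (Spec_mitad lista sublista res out) := by unfold Spec_mitad; infer_instance

def pvDiffWitness_mitad : List Int × List Int × List (List Int) := ([-1], [1], [])
def pvDiffWitnessOut_mitad : (List (List Int)) × (List (List Int)) := ([[1], []], [[1]])

-- ===== CLAIM (what is proved, stated in full; the proofs are below) =====
def Claim_unchanged_mitad : Prop := ∀ (lista : List Int) (sublista : List Int) (res : List (List Int)), Dom_mitad lista sublista res → Spec_mitad lista sublista res (mitad lista sublista res)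
def Claim_changed_mitad : Prop := Dom_mitad (pvDiffWitness_mitad.1) (pvDiffWitness_mitad.2.1) (pvDiffWitness_mitad.2.2) ∧ D_mitad (pvDiffWitness_mitad.1) (pvDiffWitness_mitad.2.1) (pvDiffWitness_mitad.2.2) ∧ mitad (pvDiffWitness_mitad.1) (pvDiffWitness_mitad.2.1) (pvDiffWitness_mitad.2.2) = pvDiffWitnessOut_mitad.1 ∧ mitad_alt (pvDiffWitness_mitad.1) (pvDiffWitness_mitad.2.1) (pvDiffWitness_mitad.2.2) = pvDiffWitnessOut_mitad.2 ∧ pvDiffWitnessOut_mitad.1 ≠ pvDiffWitnessOut_mitad.2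
def Claim_exact_mitad : Prop := ∀ (lista : List Int) (sublista : List Int) (res : List (List Int)), Dom_mitad lista sublista res → D_mitad lista sublista res → mitad lista sublista res ≠ mitad_alt lista sublista res

-- ===== LEMMAS AND PROOFS =====

-- Stepping B past a non-negative head equals running B on the tail with the head moved into sublista.
theorem mitad_alt_step (x : Int) (rest : List Int) (s : List Int) (r : List (List Int))
    (hs : s ≠ []) (hx : 0 ≤ x) :
    mitad_alt (x :: rest) s r = mitad_alt rest (s ++ [x]) r := by
  have hpx : decide (x < 0) = false := by simp; omega
  unfold mitad_alt
  rw [if_neg (by simp [hs]), if_neg (by simp)]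
  rw [List.findIdx?_cons, hpx]
  cases h : rest.findIdx? (fun y => decide (y < 0)) with
  | none =>
      simp [List.take_of_length_le (Nat.le_refl rest.length)]
  | some j =>
      simp [List.take_succ_cons]

-- A equals B outside the change region.
theorem mitad_eq_alt (lista : List Int) :
    ∀ (s : List Int) (r : List (List Int)), ¬ D_mitad lista s r →
      mitad lista s r = mitad_alt lista s r := by
  induction lista with
  | nil =>
      intro s r _
      simp [mitad, mitad_alt]
  | cons x rest ih =>
      intro s r hD
      by_cases hs : s = []
      · subst hs; simp [mitad, mitad_alt]
      · by_cases hx : x ≥ 0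
        · have hD' : ¬ D_mitad rest (s ++ [x]) r := by
            rintro ⟨hr, -, hall, y, hy, hyneg⟩
            obtain ⟨a, t, rfl⟩ := List.exists_cons_of_ne_nil hr
            refine hD ⟨by simp, hs, ?_, y, by rw [List.getLast?_cons_cons]; exact hy, hyneg⟩
            rw [List.dropLast_cons₂]
            intro z hz
            rcases List.mem_cons.mp hz with rfl | hz
            · exact hx
            · exact hall z hz
          rw [mitad, if_neg hs, if_pos hx, ih (s ++ [x]) r hD',
              ← mitad_alt_step x rest s r hs hx]
        · have hrest : rest ≠ [] := by
            intro h; subst h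
            exact hD ⟨by simp, hs, by simp, x, by simp, by omega⟩
          obtain ⟨a, t, rfl⟩ := List.exists_cons_of_ne_nil hrest
          rw [mitad, if_neg hs, if_neg hx, mitad, if_pos rfl]
          have hpx : decide (x < 0) = true := by simp; omega
          unfold mitad_alt
          rw [if_neg (by simp [hs]), List.findIdx?_cons, hpx]
          simp

-- Inside D_, A's result is one group longer than B's (it ends with the leftover []).
theorem mitad_len_D (lista : List Int) :
    ∀ (s : List Int) (r : List (List Int)), D_mitad lista s r →
      (mitad lista s r).length = r.length + 2 := by
  induction lista with
  | nil => rintro s r ⟨h, -⟩; exact absurd rfl h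
  | cons x rest ih =>
      rintro s r ⟨-, hs, hall, y, hy, hyneg⟩
      by_cases hrest : rest = []
      · subst hrest
        have hx : x < 0 := by simp at hy; omega
        rw [mitad, if_neg hs, if_neg (by omega)]
        simp [mitad]
      · obtain ⟨a, t, rfl⟩ := List.exists_cons_of_ne_nil hrest
        rw [List.dropLast_cons₂] at hall
        have hx : 0 ≤ x := hall x (List.mem_cons_self ..)
        rw [mitad, if_neg hs, if_pos (by omega)]
        refine ih (s ++ [x]) r ⟨by simp, by simp, ?_, y, ?_, hyneg⟩
        · intro z hz; exact hall z (List.mem_cons_of_mem _ hz)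
        · rw [List.getLast?_cons_cons] at hy; exact hy

theorem mitad_alt_len (lista : List Int) (s : List Int) (r : List (List Int)) (hs : s ≠ []) :
    (mitad_alt lista s r).length = r.length + 1 := by
  unfold mitad_alt
  rw [if_neg (by simp [hs])]
  simp

-- ===== VERDICT (by name: the statement is the Claim_ definition above) =====
theorem mitad_spec : Claim_unchanged_mitad := by
  intro lista s r _ hD
  exact mitad_eq_alt lista s r hD

theorem mitad_changed : Claim_changed_mitad := by unfold Claim_changed_mitad; decide

theorem mitad_tight : Claim_exact_mitad := by
  intro lista s r _ hD heq
  have h1 := mitad_len_D lista s r hD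
  have h2 := mitad_alt_len lista s r hD.2.1
  rw [heq, h2] at h1
  omega
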